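-- pv_equiv track=rewrite | github.com/fanzhangg/gomoku-ai | Player_lv.py | extend_in_four_directions
-- ===== SOURCE A (Python) =====
-- def extend_in_four_directions(board: list, i: int, j: int) -> dict:
--     lis = []
--
--     cur_row = '3'
--     idx_row = [(len(board), len(board))]
--     for k in range(len(board)):
--         cur_row += str(board[i][k])
--         idx_row.append((i, k))
--     cur_row += '3'
--     idx_row.append((len(board), len(board)))
--     lis.append((cur_row, idx_row))
--
--     cur_col = '3'
--     idx_col = [(len(board), len(board))]
--     for k in range(len(board)):
--         cur_col += str(board[k][j])
--         idx_col.append((k, j))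
--     cur_col += '3'
--     idx_col.append((len(board), len(board)))
--     lis.append((cur_col, idx_col))
--
--     cur_backslash = '3'
--     idx_backslash = [(len(board), len(board))]
--     for k in range(max(-i, -j), min(len(board) - i, len(board) - j)):
--         cur_backslash += str(board[i+k][j+k])
--         idx_backslash.append((i+k,j+k))
--     cur_backslash += '3'
--     idx_backslash.append((len(board), len(board)))
--     lis.append((cur_backslash, idx_backslash))
--
--     cur_slash = '3'
--     idx_slash = [(len(board), len(board))]
--     for k in range(max(-i, j - len(board) + 1), min(len(board) - i, j + 1)):
--         cur_slash += str(board[i+k][j-k])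
--         idx_slash.append((i+k,j-k))
--     cur_slash += '3'
--     idx_slash.append((len(board), len(board)))
--     lis.append((cur_slash, idx_slash))
--
--     return lis
-- ===== SOURCE B (Python) =====
-- def extend_in_four_directions(board: list, i: int, j: int) -> dict:
--     # One row-major sweep over the n x n grid: each cell is classified onto the
--     # four lines through (i, j) by a coordinate invariant (normalized row index,
--     # normalized column index, index difference, index sum) instead of
--     # enumerating each line's own index range.
--     n = len(board)
--     row, col, back, slash = ([], []), ([], []), ([], []), ([], [])
--     if board:
--         ri, cj = range(n)[i], range(n)[j]  # normalize (and bounds-check) the indices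
--     for a in range(n):
--         for b in range(n):
--             v = str(board[a][b])
--             if a == ri:
--                 row[0].append(v); row[1].append((i, b))
--             if b == cj:
--                 col[0].append(v); col[1].append((a, j))
--             if a - b == i - j:
--                 back[0].append(v); back[1].append((a, b))
--             if a + b == i + j:
--                 slash[0].append(v); slash[1].append((a, b))
--     frame = [(n, n)]
--     return [('3' + ''.join(vs) + '3', frame + idx + frame)
--             for vs, idx in (row, col, back, slash)]
-- ===== Notes on version B (the rewrite author's own statement) =====
-- stated objective: alternative
-- what changed: Replaces A's four per-line index-range loops by a single row-major sweep over the n-by-n grid that classifies every cell onto the four lines through (i, j) by coordinate invariants (normalized row index, normalized column index, index difference, index sum); Pre_ keeps boards whose rows reach length n with in-range i, j (square if j is negative).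
import Mathlib
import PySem

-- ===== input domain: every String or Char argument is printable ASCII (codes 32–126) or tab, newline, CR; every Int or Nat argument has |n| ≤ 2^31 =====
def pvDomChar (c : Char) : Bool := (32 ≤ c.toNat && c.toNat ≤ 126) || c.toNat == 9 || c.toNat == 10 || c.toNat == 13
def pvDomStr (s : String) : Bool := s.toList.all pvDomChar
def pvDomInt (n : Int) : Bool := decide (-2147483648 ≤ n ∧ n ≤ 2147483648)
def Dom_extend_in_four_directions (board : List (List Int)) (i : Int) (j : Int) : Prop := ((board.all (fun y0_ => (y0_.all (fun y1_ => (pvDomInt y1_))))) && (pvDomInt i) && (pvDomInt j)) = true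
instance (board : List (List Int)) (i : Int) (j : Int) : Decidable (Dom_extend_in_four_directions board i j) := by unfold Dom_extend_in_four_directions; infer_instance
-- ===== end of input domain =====

-- B replaces A's four per-line index-range loops by one row-major sweep of the n×n grid
-- that classifies every cell onto the four lines by coordinate invariants (objective:
-- alternative — B reads all n² cells where A reads only the four lines).

-- board[a][b] (Python indexing, possibly negative, via PySem.List.pyGet?;
-- the .getD defaults are only reached outside Pre_).
def pvCell (board : List (List Int)) (a b : Int) : Int :=
  (PySem.List.pyGet? ((PySem.List.pyGet? board a).getD []) b).getD 0

-- ===== PORT A =====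
def extend_in_four_directions (board : List (List Int)) (i : Int) (j : Int) : List (String × (List (Int × Int))) :=
  let n : Int := board.length
  let r := (PySem.List.pyRange 0 n 1).foldl
    (fun (st : String × List (Int × Int)) k =>
      (st.1 ++ PySem.Int.toStr (pvCell board i k), st.2 ++ [(i, k)])) ("3", [(n, n)])
  let rowPair := (r.1 ++ "3", r.2 ++ [(n, n)])
  let c := (PySem.List.pyRange 0 n 1).foldl
    (fun (st : String × List (Int × Int)) k =>
      (st.1 ++ PySem.Int.toStr (pvCell board k j), st.2 ++ [(k, j)])) ("3", [(n, n)])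
  let colPair := (c.1 ++ "3", c.2 ++ [(n, n)])
  let b := (PySem.List.pyRange (max (-i) (-j)) (min (n - i) (n - j)) 1).foldl
    (fun (st : String × List (Int × Int)) k =>
      (st.1 ++ PySem.Int.toStr (pvCell board (i + k) (j + k)), st.2 ++ [(i + k, j + k)])) ("3", [(n, n)])
  let backPair := (b.1 ++ "3", b.2 ++ [(n, n)])
  let s := (PySem.List.pyRange (max (-i) (j - n + 1)) (min (n - i) (j + 1)) 1).foldl
    (fun (st : String × List (Int × Int)) k =>
      (st.1 ++ PySem.Int.toStr (pvCell board (i + k) (j - k)), st.2 ++ [(i + k, j - k)])) ("3", [(n, n)])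
  let slashPair := (s.1 ++ "3", s.2 ++ [(n, n)])
  [rowPair, colPair, backPair, slashPair]

-- ===== PORT B =====
-- accumulator: (strings, coords) for each of row, col, back(slash), slash
-- '3' + ''.join(vs) + '3' and [(n,n)] + idx + [(n,n)] applied to one accumulated line
def pvFinish (n : Int) (p : List String × List (Int × Int)) : String × List (Int × Int) :=
  ("3" ++ String.join p.1 ++ "3", [(n, n)] ++ p.2 ++ [(n, n)])

def extend_in_four_directions_alt (board : List (List Int)) (i : Int) (j : Int) : List (String × (List (Int × Int))) :=
  let n : Int := board.length
  -- ri, cj = range(n)[i], range(n)[j] (the .getD default is only reached when board = [],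
  -- where the loop never tests it; outside Pre_ when the Python raises IndexError)
  let ri : Int := (PySem.List.pyGet? (PySem.List.pyRange 0 n 1) i).getD 0
  let cj : Int := (PySem.List.pyGet? (PySem.List.pyRange 0 n 1) j).getD 0
  let st :=
    (PySem.List.pyRange 0 n 1).foldl (fun st a =>
      (PySem.List.pyRange 0 n 1).foldl
        (fun (st : (List String × List (Int × Int)) × (List String × List (Int × Int)) ×
                   (List String × List (Int × Int)) × (List String × List (Int × Int))) b =>
          let v := PySem.Int.toStr (pvCell board a b)
          let row := if a = ri then (st.1.1 ++ [v], st.1.2 ++ [(i, b)]) else st.1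
          let col := if b = cj then (st.2.1.1 ++ [v], st.2.1.2 ++ [(a, j)]) else st.2.1
          let back := if a - b = i - j then (st.2.2.1.1 ++ [v], st.2.2.1.2 ++ [(a, b)]) else st.2.2.1
          let slash := if a + b = i + j then (st.2.2.2.1 ++ [v], st.2.2.2.2 ++ [(a, b)]) else st.2.2.2
          (row, col, back, slash)) st)
      (([], []), ([], []), ([], []), ([], []))
  [pvFinish n st.1, pvFinish n st.2.1, pvFinish n st.2.2.1, pvFinish n st.2.2.2]

-- ===== PRECONDITION & SPEC =====
-- Pre_: every row reaches length n (else B's n×n sweep raises where A may return),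
-- i and j in-range Python-style, and for a negative j the board must be square: on a
-- ragged board A's negative column index wraps per row, which no n×n reading matches
-- (see claim cites).
def Pre_extend_in_four_directions (board : List (List Int)) (i : Int) (j : Int) : Prop :=
  board = [] ∨
  ((∀ r ∈ board, board.length ≤ r.length) ∧
   -(board.length : Int) ≤ i ∧ i < (board.length : Int) ∧
   -(board.length : Int) ≤ j ∧ j < (board.length : Int) ∧
   (0 ≤ j ∨ ∀ r ∈ board, r.length = board.length))
instance (board : List (List Int)) (i : Int) (j : Int) : Decidable (Pre_extend_in_four_directions board i j) := by unfold Pre_extend_in_four_directions; infer_instance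

def pvWitness_extend_in_four_directions : List (List Int) × Int × Int := ([[1, 0], [2, 1]], 0, 1)

def Spec_extend_in_four_directions (board : List (List Int)) (i : Int) (j : Int) (out : List (String × (List (Int × Int)))) : Prop := out = extend_in_four_directions_alt board i j
instance (board : List (List Int)) (i : Int) (j : Int) (out : List (String × (List (Int × Int)))) : Decidable (Spec_extend_in_four_directions board i j out) := by unfold Spec_extend_in_four_directions; infer_instance

-- ===== CLAIM (what is proved, stated in full; the proofs are below) =====
def Claim_equal_extend_in_four_directions : Prop := ∀ (board : List (List Int)) (i : Int) (j : Int), Dom_extend_in_four_directions board i j → Pre_extend_in_four_directions board i j → Spec_extend_in_four_directions board i j (extend_in_four_directions board i j)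

-- ===== LEMMAS AND PROOFS =====

-- abbreviation for B's sweep state
abbrev pvSt : Type := (List String × List (Int × Int)) × (List String × List (Int × Int)) ×
                   (List String × List (Int × Int)) × (List String × List (Int × Int))

theorem pv_join_cons (x : String) (l : List String) : String.join (x :: l) = x ++ String.join l := by
  apply String.ext; simp

-- A's lockstep accumulation equals prefix ++ join-of-map / prefix ++ map.
theorem pv_foldl_line (l : List Int) (f : Int → String) (g : Int → Int × Int) :
    ∀ (s0 : String) (t0 : List (Int × Int)),
      l.foldl (fun (st : String × List (Int × Int)) k => (st.1 ++ f k, st.2 ++ [g k])) (s0, t0)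
        = (s0 ++ String.join (l.map f), t0 ++ l.map g) := by
  induction l with
  | nil =>
      intro s0 t0
      simp only [List.foldl_nil, List.map_nil, List.append_nil, String.join]
      rw [Prod.mk.injEq]
      exact ⟨by apply String.ext; simp, rfl⟩
  | cons x xs ih =>
      intro s0 t0
      simp only [List.foldl_cons, List.map_cons]
      rw [ih, pv_join_cons]
      simp [String.append_assoc]

-- a fold of a 4-tuple of independent updates is the 4-tuple of folds
theorem pv_foldl_prod4 {β σ₁ σ₂ σ₃ σ₄ : Type} (l : List β)
    (f1 : σ₁ → β → σ₁) (f2 : σ₂ → β → σ₂) (f3 : σ₃ → β → σ₃) (f4 : σ₄ → β → σ₄)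
    (st : σ₁ × σ₂ × σ₃ × σ₄) :
    l.foldl (fun st b => (f1 st.1 b, f2 st.2.1 b, f3 st.2.2.1 b, f4 st.2.2.2 b)) st
      = (l.foldl f1 st.1, l.foldl f2 st.2.1, l.foldl f3 st.2.2.1, l.foldl f4 st.2.2.2) := by
  induction l generalizing st with
  | nil => rfl
  | cons b l ih => simpa using ih (f1 st.1 b, f2 st.2.1 b, f3 st.2.2.1 b, f4 st.2.2.2 b)

-- lockstep conditional append over a pair accumulates map-over-filter
theorem pv_foldl_pair_if {α β : Type} (l : List Int) (p : Int → Prop) [DecidablePred p]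
    (f : Int → α) (g : Int → β) (pr : List α × List β) :
    l.foldl (fun pr b => if p b then (pr.1 ++ [f b], pr.2 ++ [g b]) else pr) pr
      = (pr.1 ++ (l.filter (fun b => decide (p b))).map f,
         pr.2 ++ (l.filter (fun b => decide (p b))).map g) := by
  induction l generalizing pr with
  | nil => simp
  | cons b l ih => by_cases h : p b <;> simp [h, ih, List.append_assoc]

-- characterization of B's inner sweep over one grid row
theorem pv_inner_char (board : List (List Int)) (ri cj i j a : Int) (l : List Int) (st : pvSt) :
    l.foldl
      (fun (st : pvSt) b =>
        (if a = ri then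
            (st.1.1 ++ [PySem.Int.toStr (pvCell board a b)], st.1.2 ++ [(i, b)]) else st.1,
         if b = cj then
            (st.2.1.1 ++ [PySem.Int.toStr (pvCell board a b)], st.2.1.2 ++ [(a, j)]) else st.2.1,
         if a - b = i - j then
            (st.2.2.1.1 ++ [PySem.Int.toStr (pvCell board a b)], st.2.2.1.2 ++ [(a, b)]) else st.2.2.1,
         if a + b = i + j then
            (st.2.2.2.1 ++ [PySem.Int.toStr (pvCell board a b)], st.2.2.2.2 ++ [(a, b)]) else st.2.2.2)) st
    = ((st.1.1 ++ (l.filter (fun _ => decide (a = ri))).map (fun b => PySem.Int.toStr (pvCell board a b)),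
        st.1.2 ++ (l.filter (fun _ => decide (a = ri))).map (fun b => ((i, b) : Int × Int))),
       (st.2.1.1 ++ (l.filter (fun b => decide (b = cj))).map (fun b => PySem.Int.toStr (pvCell board a b)),
        st.2.1.2 ++ (l.filter (fun b => decide (b = cj))).map (fun _ => ((a, j) : Int × Int))),
       (st.2.2.1.1 ++ (l.filter (fun b => decide (a - b = i - j))).map (fun b => PySem.Int.toStr (pvCell board a b)),
        st.2.2.1.2 ++ (l.filter (fun b => decide (a - b = i - j))).map (fun b => ((a, b) : Int × Int))),
       (st.2.2.2.1 ++ (l.filter (fun b => decide (a + b = i + j))).map (fun b => PySem.Int.toStr (pvCell board a b)),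
        st.2.2.2.2 ++ (l.filter (fun b => decide (a + b = i + j))).map (fun b => ((a, b) : Int × Int)))) := by
  exact (pv_foldl_prod4 l
      (fun pr b => if a = ri then (pr.1 ++ [PySem.Int.toStr (pvCell board a b)], pr.2 ++ [(i, b)]) else pr)
      (fun pr b => if b = cj then (pr.1 ++ [PySem.Int.toStr (pvCell board a b)], pr.2 ++ [(a, j)]) else pr)
      (fun pr b => if a - b = i - j then (pr.1 ++ [PySem.Int.toStr (pvCell board a b)], pr.2 ++ [(a, b)]) else pr)
      (fun pr b => if a + b = i + j then (pr.1 ++ [PySem.Int.toStr (pvCell board a b)], pr.2 ++ [(a, b)]) else pr)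
      st).trans
    (by rw [pv_foldl_pair_if, pv_foldl_pair_if, pv_foldl_pair_if, pv_foldl_pair_if])

-- B's outer sweep: pairwise appends accumulate by flatMap
theorem pv_outer_char (l : List Int)
    (g1 g2 g3 g4 : Int → List String) (h1 h2 h3 h4 : Int → List (Int × Int)) (st : pvSt) :
    l.foldl
      (fun (st : pvSt) a =>
        ((st.1.1 ++ g1 a, st.1.2 ++ h1 a),
         (st.2.1.1 ++ g2 a, st.2.1.2 ++ h2 a),
         (st.2.2.1.1 ++ g3 a, st.2.2.1.2 ++ h3 a),
         (st.2.2.2.1 ++ g4 a, st.2.2.2.2 ++ h4 a))) st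
    = ((st.1.1 ++ l.flatMap g1, st.1.2 ++ l.flatMap h1),
       (st.2.1.1 ++ l.flatMap g2, st.2.1.2 ++ l.flatMap h2),
       (st.2.2.1.1 ++ l.flatMap g3, st.2.2.1.2 ++ l.flatMap h3),
       (st.2.2.2.1 ++ l.flatMap g4, st.2.2.2.2 ++ l.flatMap h4)) := by
  induction l generalizing st with
  | nil => simp
  | cons a l ih => simp [ih, List.append_assoc]

-- a filter of a range by a condition equivalent (on the range) to a window is the sub-range
theorem pv_filter_range (lo hi lo' hi' : Int) (p : Int → Prop) [DecidablePred p]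
    (hp : ∀ x, lo ≤ x → x < hi → (p x ↔ (lo' ≤ x ∧ x < hi'))) :
    (PySem.List.pyRange lo hi 1).filter (fun x => decide (p x))
      = PySem.List.pyRange (max lo lo') (min hi hi') 1 := by
  by_cases hAB : max lo lo' < min hi hi'
  · rw [PySem.List.pyRange_one_append lo (max lo lo') hi (by omega) (by omega),
        PySem.List.pyRange_one_append (max lo lo') (min hi hi') hi (by omega) (by omega),
        List.filter_append, List.filter_append]
    rw [List.filter_eq_nil_iff.mpr (fun x hx => by
          have := PySem.List.mem_pyRange_one.mp hx
          simp only [decide_eq_true_eq]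
          exact fun hpx => by have := (hp x (by omega) (by omega)).mp hpx; omega),
        List.filter_eq_self.mpr (fun x hx => by
          have := PySem.List.mem_pyRange_one.mp hx
          simp only [decide_eq_true_eq]
          exact (hp x (by omega) (by omega)).mpr (by omega)),
        List.filter_eq_nil_iff.mpr (fun x hx => by
          have := PySem.List.mem_pyRange_one.mp hx
          simp only [decide_eq_true_eq]
          exact fun hpx => by have := (hp x (by omega) (by omega)).mp hpx; omega)]
    simp
  · have hnil : PySem.List.pyRange (max lo lo') (min hi hi') 1 = [] :=
      PySem.List.pyRange_one_eq_nil (by omega)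
    rw [hnil]
    apply List.filter_eq_nil_iff.mpr
    intro x hx
    have := PySem.List.mem_pyRange_one.mp hx
    simp only [decide_eq_true_eq]
    exact fun hpx => by have := (hp x (by omega) (by omega)).mp hpx; omega

-- flatMap of a conditionally-kept block over a range with a unique hit
theorem pv_flatMap_single {α : Type} (lo hi t : Int) (blk : Int → List α) (p : Int → Prop)
    [DecidablePred p] (h1 : lo ≤ t) (h2 : t < hi)
    (hp : ∀ x, lo ≤ x → x < hi → (p x ↔ x = t)) :
    (PySem.List.pyRange lo hi 1).flatMap (fun a => if p a then blk a else []) = blk t := by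
  rw [PySem.List.pyRange_one_append lo t hi h1 (by omega),
      PySem.List.pyRange_one_cons h2, List.flatMap_append, List.flatMap_cons]
  rw [List.flatMap_eq_nil_iff.mpr (fun x hx => by
        have := PySem.List.mem_pyRange_one.mp hx
        rw [if_neg]
        intro hpx
        have := (hp x (by omega) (by omega)).mp hpx; omega),
      List.flatMap_eq_nil_iff.mpr (fun x hx => by
        have := PySem.List.mem_pyRange_one.mp hx
        rw [if_neg]
        intro hpx
        have := (hp x (by omega) (by omega)).mp hpx; omega),
      if_pos ((hp t h1 h2).mpr rfl)]
  simp

-- flatMap of if-singletons is map-over-filter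
theorem pv_flatMap_if_singleton {α : Type} (l : List Int) (p : Int → Prop) [DecidablePred p]
    (f : Int → α) :
    l.flatMap (fun a => if p a then [f a] else [])
      = (l.filter (fun a => decide (p a))).map f := by
  induction l with
  | nil => simp
  | cons a l ih => by_cases h : p a <;> simp [h, ih]

-- Python wraparound on a valid index picks the shifted nonnegative index
theorem pv_pyGet_wrap {α : Type} (xs : List α) (i : Int)
    (h1 : -(xs.length : Int) ≤ i) :
    PySem.List.pyGet? xs i = PySem.List.pyGet? xs (if i < 0 then i + xs.length else i) := by
  by_cases h : i < 0
  · rw [if_pos h]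
    obtain ⟨k, hk, hkpos, hkle⟩ : ∃ k : Nat, i = -(k : Int) ∧ 0 < k ∧ k ≤ xs.length :=
      ⟨(-i).toNat, by omega, by omega, by omega⟩
    rw [hk, PySem.List.pyGet?_neg_natCast xs k hkpos hkle,
        show (-(k : Int) + xs.length) = ((xs.length - k : Nat) : Int) by omega,
        PySem.List.pyGet?_natCast]
  · rw [if_neg h]


-- flatMap of singleton blocks is a map
theorem pv_flatMap_pure {α : Type} (l : List Int) (g : Int → α) :
    l.flatMap (fun a => [g a]) = l.map g := by
  induction l with
  | nil => simp
  | cons a l ih => simp [ih]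

-- shifting a range under a map
theorem pv_map_range_shift {α : Type} (lo hi c : Int) (f : Int → α) :
    (PySem.List.pyRange (c + lo) (c + hi) 1).map f
      = (PySem.List.pyRange lo hi 1).map (fun k => f (c + k)) := by
  rw [PySem.List.pyRange_one, PySem.List.pyRange_one,
      show c + hi - (c + lo) = hi - lo by ring]
  simp only [List.map_map]
  apply List.map_congr_left
  intro k _
  simp only [Function.comp_apply]
  congr 1
  ring

-- range(n)[t]: bounds-checked index normalization
theorem pv_range_get (n t : Int) (h1 : -n ≤ t) (h2 : t < n) :
    (PySem.List.pyGet? (PySem.List.pyRange 0 n 1) t).getD 0 = if t < 0 then t + n else t := by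
  have hlen : (((PySem.List.pyRange 0 n 1).length : Nat) : Int) = n := by
    rw [PySem.List.length_pyRange_one]; omega
  have key : ∀ k : Int, 0 ≤ k → k < n →
      (PySem.List.pyGet? (PySem.List.pyRange 0 n 1) k).getD 0 = k := by
    intro k hk hk2
    rw [PySem.List.pyGet?_of_nonneg _ hk, PySem.List.pyRange_one]
    rw [List.getElem?_map]
    simp [show k.toNat < n.toNat by omega]
    omega
  rw [pv_pyGet_wrap _ t (by rw [hlen]; exact h1), hlen]
  split_ifs with h
  · exact key (t + n) (by omega) (by omega)
  · exact key t (by omega) (by omega)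

-- the row line: the (constant-in-b) filter keeps only row t
theorem pv_line_row {α : Type} (n t : Int) (u : Int → Int → α)
    (h0 : 0 ≤ t) (h1 : t < n) :
    (PySem.List.pyRange 0 n 1).flatMap
      (fun a => ((PySem.List.pyRange 0 n 1).filter (fun _ => decide (a = t))).map (u a))
      = (PySem.List.pyRange 0 n 1).map (u t) := by
  have hfun : ∀ a : Int,
      ((PySem.List.pyRange 0 n 1).filter (fun _ => decide (a = t))).map (u a)
        = if a = t then (PySem.List.pyRange 0 n 1).map (u a) else [] := by
    intro a; by_cases h : a = t <;> simp [h]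
  simp only [hfun]
  exact pv_flatMap_single 0 n t _ _ h0 h1 (fun x _ _ => Iff.rfl)

-- the column line: every row contributes the single column t
theorem pv_line_col {α : Type} (n t : Int) (u : Int → Int → α)
    (h0 : 0 ≤ t) (h1 : t < n) :
    (PySem.List.pyRange 0 n 1).flatMap
      (fun a => ((PySem.List.pyRange 0 n 1).filter (fun b => decide (b = t))).map (u a))
      = (PySem.List.pyRange 0 n 1).map (fun a => u a t) := by
  have hfilt : (PySem.List.pyRange 0 n 1).filter (fun b => decide (b = t)) = [t] := by
    rw [pv_filter_range 0 n t (t + 1) _ (fun x hx hx2 => by omega),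
        show max 0 t = t by omega, show min n (t + 1) = t + 1 by omega,
        PySem.List.pyRange_one_singleton]
  simp only [hfilt, List.map_cons, List.map_nil]
  exact pv_flatMap_pure _ _

-- the backslash diagonal: per row a the single column a - d
theorem pv_line_diag1 {α : Type} (n d : Int) (u : Int → Int → α) :
    (PySem.List.pyRange 0 n 1).flatMap
      (fun a => ((PySem.List.pyRange 0 n 1).filter (fun b => decide (a - b = d))).map (u a))
      = (PySem.List.pyRange (max 0 d) (min n (n + d)) 1).map (fun a => u a (a - d)) := by
  have hfilt : ∀ a : Int, (PySem.List.pyRange 0 n 1).filter (fun b => decide (a - b = d))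
      = if 0 ≤ a - d ∧ a - d < n then [a - d] else [] := by
    intro a
    rw [pv_filter_range 0 n (a - d) (a - d + 1) _ (fun x hx hx2 => by omega)]
    by_cases h : 0 ≤ a - d ∧ a - d < n
    · rw [if_pos h, show max 0 (a - d) = a - d by omega, show min n (a - d + 1) = a - d + 1 by omega,
          PySem.List.pyRange_one_singleton]
    · rw [if_neg h, PySem.List.pyRange_one_eq_nil (by omega)]
  have hmap : ∀ a : Int,
      ((if 0 ≤ a - d ∧ a - d < n then [a - d] else []).map (u a))
        = if 0 ≤ a - d ∧ a - d < n then [u a (a - d)] else [] := by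
    intro a; split_ifs <;> simp
  simp only [hfilt, hmap]
  rw [pv_flatMap_if_singleton _ (fun a => 0 ≤ a - d ∧ a - d < n) (fun a => u a (a - d)),
      pv_filter_range 0 n d (n + d) _ (fun x hx hx2 => by omega)]

-- the slash diagonal: per row a the single column s - a
theorem pv_line_diag2 {α : Type} (n s : Int) (u : Int → Int → α) :
    (PySem.List.pyRange 0 n 1).flatMap
      (fun a => ((PySem.List.pyRange 0 n 1).filter (fun b => decide (a + b = s))).map (u a))
      = (PySem.List.pyRange (max 0 (s - n + 1)) (min n (s + 1)) 1).map (fun a => u a (s - a)) := by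
  have hfilt : ∀ a : Int, (PySem.List.pyRange 0 n 1).filter (fun b => decide (a + b = s))
      = if 0 ≤ s - a ∧ s - a < n then [s - a] else [] := by
    intro a
    rw [pv_filter_range 0 n (s - a) (s - a + 1) _ (fun x hx hx2 => by omega)]
    by_cases h : 0 ≤ s - a ∧ s - a < n
    · rw [if_pos h, show max 0 (s - a) = s - a by omega, show min n (s - a + 1) = s - a + 1 by omega,
          PySem.List.pyRange_one_singleton]
    · rw [if_neg h, PySem.List.pyRange_one_eq_nil (by omega)]
  have hmap : ∀ a : Int,
      ((if 0 ≤ s - a ∧ s - a < n then [s - a] else []).map (u a))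
        = if 0 ≤ s - a ∧ s - a < n then [u a (s - a)] else [] := by
    intro a; split_ifs <;> simp
  simp only [hfilt, hmap]
  rw [pv_flatMap_if_singleton _ (fun a => 0 ≤ s - a ∧ s - a < n) (fun a => u a (s - a)),
      pv_filter_range 0 n (s - n + 1) (s + 1) _ (fun x hx hx2 => by omega)]

-- reading board[a][j] with a valid (possibly negative) j on a square board
theorem pv_cell_wrapj (board : List (List Int)) (a j : Int)
    (hsq : ∀ r ∈ board, r.length = board.length)
    (ha : 0 ≤ a) (ha2 : a < (board.length : Int))
    (hj : -(board.length : Int) ≤ j) :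
    pvCell board a j = pvCell board a (if j < 0 then j + board.length else j) := by
  unfold pvCell
  rw [PySem.List.pyGet?_eq_some_getElem board ha ha2]
  simp only [Option.getD_some]
  have hlen : (board[a.toNat]'(by omega)).length = board.length :=
    hsq _ (List.getElem_mem _)
  rw [pv_pyGet_wrap _ j (by rw [hlen]; exact hj), hlen]

theorem extend_in_four_directions_eq_alt (board : List (List Int)) (i : Int) (j : Int)
    (hpre : Pre_extend_in_four_directions board i j) :
    extend_in_four_directions board i j = extend_in_four_directions_alt board i j := by
  rcases hpre with hnil | ⟨hrows, hi1, hi2, hj1, hj2, hjs⟩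
  · subst hnil
    have r1 : PySem.List.pyRange 0 0 1 = [] := PySem.List.pyRange_one_eq_nil le_rfl
    have r3 : PySem.List.pyRange (max (-i) (j + 1)) (min (-i) (j + 1)) 1 = [] :=
      PySem.List.pyRange_one_eq_nil (by omega)
    simp [extend_in_four_directions, extend_in_four_directions_alt, r1, r3, pvFinish]
    all_goals decide
  · have hn : (0 : Int) < (board.length : Int) := by omega
    simp only [extend_in_four_directions, extend_in_four_directions_alt]
    have hri : (PySem.List.pyGet? (PySem.List.pyRange 0 (board.length : Int) 1) i).getD 0
        = (if i < 0 then i + (board.length : Int) else i) := pv_range_get _ i hi1 hi2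
    have hcj : (PySem.List.pyGet? (PySem.List.pyRange 0 (board.length : Int) 1) j).getD 0
        = (if j < 0 then j + (board.length : Int) else j) := pv_range_get _ j hj1 hj2
    simp only [hri, hcj]
    rw [pv_foldl_line, pv_foldl_line, pv_foldl_line, pv_foldl_line]
    rw [PySem.List.foldl_congr_mem _ _ _ _
          (fun acc a _ => pv_inner_char board
            (if i < 0 then i + (board.length : Int) else i)
            (if j < 0 then j + (board.length : Int) else j) i j a
            (PySem.List.pyRange 0 (board.length : Int) 1) acc)]
    rw [pv_outer_char]
    simp only [List.nil_append]
    rw [pv_line_row (board.length : Int) (if i < 0 then i + (board.length : Int) else i)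
          (fun a b => PySem.Int.toStr (pvCell board a b))
          (by split_ifs <;> omega) (by split_ifs <;> omega),
        pv_line_row (board.length : Int) (if i < 0 then i + (board.length : Int) else i)
          (fun _ b => ((i, b) : Int × Int))
          (by split_ifs <;> omega) (by split_ifs <;> omega),
        pv_line_col (board.length : Int) (if j < 0 then j + (board.length : Int) else j)
          (fun a b => PySem.Int.toStr (pvCell board a b))
          (by split_ifs <;> omega) (by split_ifs <;> omega),
        pv_line_col (board.length : Int) (if j < 0 then j + (board.length : Int) else j)
          (fun a _ => ((a, j) : Int × Int))
          (by split_ifs <;> omega) (by split_ifs <;> omega),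
        pv_line_diag1 (board.length : Int) (i - j) (fun a b => PySem.Int.toStr (pvCell board a b)),
        pv_line_diag1 (board.length : Int) (i - j) (fun a b => ((a, b) : Int × Int)),
        pv_line_diag2 (board.length : Int) (i + j) (fun a b => PySem.Int.toStr (pvCell board a b)),
        pv_line_diag2 (board.length : Int) (i + j) (fun a b => ((a, b) : Int × Int))]
    -- row: board[i] is board[ri]
    have hwrap : PySem.List.pyGet? board i
        = PySem.List.pyGet? board (if i < 0 then i + (board.length : Int) else i) := by
      have := pv_pyGet_wrap board i hi1
      simpa using this
    have hrow : (fun k => PySem.Int.toStr (pvCell board i k))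
        = (fun b => PySem.Int.toStr (pvCell board (if i < 0 then i + (board.length : Int) else i) b)) := by
      funext b
      unfold pvCell
      rw [hwrap]
    rw [hrow]
    -- column: board[k][j] is board[k][cj]
    have hcol : (PySem.List.pyRange 0 (board.length : Int) 1).map (fun k => PySem.Int.toStr (pvCell board k j))
        = (PySem.List.pyRange 0 (board.length : Int) 1).map
            (fun a => PySem.Int.toStr (pvCell board a (if j < 0 then j + (board.length : Int) else j))) := by
      rcases hjs with hj0 | hsq
      · rw [show (if j < 0 then j + (board.length : Int) else j) = j from if_neg (by omega)]
      · apply List.map_congr_left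
        intro x hx
        have hb := PySem.List.mem_pyRange_one.mp hx
        have := pv_cell_wrapj board x j hsq (by omega) (by omega) hj1
        rw [this]
    rw [hcol]
    -- backslash diagonal: reindex by the row instead of the offset
    have hback : ∀ {α : Type} (u : Int → Int → α),
        (PySem.List.pyRange (max 0 (i - j)) (min (board.length : Int) ((board.length : Int) + (i - j))) 1).map
            (fun a => u a (a - (i - j)))
          = (PySem.List.pyRange (max (-i) (-j)) (min ((board.length : Int) - i) ((board.length : Int) - j)) 1).map
              (fun k => u (i + k) (j + k)) := by
      intro α u
      rw [show max 0 (i - j) = i + max (-i) (-j) by omega,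
          show min (board.length : Int) ((board.length : Int) + (i - j))
              = i + min ((board.length : Int) - i) ((board.length : Int) - j) by omega,
          pv_map_range_shift]
      apply List.map_congr_left
      intro k _
      rw [show i + k - (i - j) = j + k by ring]
    rw [hback (fun a b => PySem.Int.toStr (pvCell board a b)),
        hback (fun a b => ((a, b) : Int × Int))]
    -- slash diagonal: reindex by the row instead of the offset
    have hslash : ∀ {α : Type} (u : Int → Int → α),
        (PySem.List.pyRange (max 0 (i + j - (board.length : Int) + 1)) (min (board.length : Int) (i + j + 1)) 1).map
            (fun a => u a (i + j - a))
          = (PySem.List.pyRange (max (-i) (j - (board.length : Int) + 1)) (min ((board.length : Int) - i) (j + 1)) 1).map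
              (fun k => u (i + k) (j - k)) := by
      intro α u
      rw [show max 0 (i + j - (board.length : Int) + 1) = i + max (-i) (j - (board.length : Int) + 1) by omega,
          show min (board.length : Int) (i + j + 1) = i + min ((board.length : Int) - i) (j + 1) by omega,
          pv_map_range_shift]
      apply List.map_congr_left
      intro k _
      rw [show i + j - (i + k) = j - k by ring]
    rw [hslash (fun a b => PySem.Int.toStr (pvCell board a b)),
        hslash (fun a b => ((a, b) : Int × Int))]
    simp [pvFinish, String.append_assoc]

-- ===== VERDICT (by name: the statement is the Claim_ definition above) =====
theorem extend_in_four_directions_spec : Claim_equal_extend_in_four_directions := by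
  intro board i j _ hpre
  exact extend_in_four_directions_eq_alt board i j hpre
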